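-- pv_equiv track=rewrite | github.com/jmartgmz/local-playlist-checker | app.py | parse_duration_to_ms
-- ===== SOURCE A (Python) =====
-- from typing import Dict, List, Optional, Sequence, Tuple
--
-- def parse_duration_to_ms(value: str) -> Optional[int]:
--     raw = value.strip()
--     if not raw:
--         return None
--
--     if raw.isdigit():
--         return int(raw)
--
--     # Supports formats like mm:ss and hh:mm:ss from CSV exports.
--     parts = raw.split(":")
--     if not all(part.isdigit() for part in parts):
--         return None
--
--     if len(parts) == 2:
--         minutes, seconds = int(parts[0]), int(parts[1])
--         return (minutes * 60 + seconds) * 1000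
--
--     if len(parts) == 3:
--         hours, minutes, seconds = int(parts[0]), int(parts[1]), int(parts[2])
--         return (hours * 3600 + minutes * 60 + seconds) * 1000
--
--     return None
-- ===== SOURCE B (Python) =====
-- def parse_duration_to_ms(value):
--     parts = value.strip().split(":")
--     if not all(p.isdigit() for p in parts):
--         return None
--     if len(parts) == 1:
--         return int(parts[0])
--     if len(parts) > 3:
--         return None
--     total = 0
--     for p in parts:
--         total = total * 60 + int(p)
--     return total * 1000
-- ===== Notes on version B (the rewrite author's own statement) =====
-- stated objective: simpler
-- what changed: Replaces the empty-string guard, digit fast-path and two separate closed-form branches for mm:ss and hh:mm:ss with a single split-then-Horner pass: every input goes through split(':'), one all-digit check, and a base-60 fold total = total*60 + int(p) (the length-1 case being the un-multiplied fast path), with no empty guard needed.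
import Mathlib
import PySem

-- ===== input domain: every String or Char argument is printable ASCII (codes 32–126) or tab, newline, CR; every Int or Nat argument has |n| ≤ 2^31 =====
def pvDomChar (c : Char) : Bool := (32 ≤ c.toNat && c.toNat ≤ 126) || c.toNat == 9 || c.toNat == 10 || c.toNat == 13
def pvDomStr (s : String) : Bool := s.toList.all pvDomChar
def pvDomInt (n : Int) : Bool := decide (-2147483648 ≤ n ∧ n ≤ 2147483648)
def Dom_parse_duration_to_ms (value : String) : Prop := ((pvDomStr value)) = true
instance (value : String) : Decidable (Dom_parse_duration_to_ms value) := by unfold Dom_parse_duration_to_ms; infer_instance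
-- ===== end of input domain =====

-- B replaces A's empty-guard, digit fast-path and two separate closed-form branches by one
-- split + all-digit check + base-60 Horner fold (objective: simpler).

-- shared helpers: str.split(sep) for a nonempty literal sep (= PySem.Str.split? without the Option), and int(s)
def pySplit (s sep : String) : List String :=
  (PySem.Chars.splitOn s.toList sep.toList).map String.ofList

-- int(s); exact here: only applied to strings passing str.isdigit, where int() returns normally
def pyInt (s : String) : Int := (PySem.Int.ofStr? s).getD 0

-- ===== PORT A =====
def parse_duration_to_ms (value : String) : Option Int :=
  let raw := PySem.Str.strip value
  if raw = "" then none
  else if PySem.Str.strIsdigit raw then some (pyInt raw)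
  else
    let parts := pySplit raw ":"
    if !(parts.all PySem.Str.strIsdigit) then none
    else if parts.length = 2 then
      some ((pyInt (PySem.List.pyGetD parts 0 "") * 60 + pyInt (PySem.List.pyGetD parts 1 "")) * 1000)
    else if parts.length = 3 then
      some ((pyInt (PySem.List.pyGetD parts 0 "") * 3600 + pyInt (PySem.List.pyGetD parts 1 "") * 60
             + pyInt (PySem.List.pyGetD parts 2 "")) * 1000)
    else none

-- ===== PORT B =====
def parse_duration_to_ms_alt (value : String) : Option Int :=
  let parts := pySplit (PySem.Str.strip value) ":"
  if !(parts.all PySem.Str.strIsdigit) then none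
  else if parts.length = 1 then some (pyInt (PySem.List.pyGetD parts 0 ""))
  else if parts.length > 3 then none
  else some ((parts.foldl (fun t p => t * 60 + pyInt p) 0) * 1000)

-- ===== PRECONDITION & SPEC =====
def Spec_parse_duration_to_ms (value : String) (out : Option Int) : Prop := out = parse_duration_to_ms_alt value
instance (value : String) (out : Option Int) : Decidable (Spec_parse_duration_to_ms value out) := by unfold Spec_parse_duration_to_ms; infer_instance

-- ===== CLAIM (what is proved, stated in full; the proofs are below) =====
def Claim_equal_parse_duration_to_ms : Prop := ∀ (value : String), Dom_parse_duration_to_ms value → Spec_parse_duration_to_ms value (parse_duration_to_ms value)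

-- ===== LEMMAS AND PROOFS =====

-- specification of splitting on a single character c: (chars before the first c, the remaining parts)
def sp (c : Char) : List Char → List Char × List (List Char)
  | [] => ([], [])
  | h :: t =>
      let pr := sp c t
      if h = c then ([], pr.1 :: pr.2) else (h :: pr.1, pr.2)

theorem go_eq (c : Char) (fuel : Nat) (l cur : List Char) (acc : List (List Char)) (h : l.length < fuel) :
    PySem.Chars.splitOn.go [c] fuel l cur acc
      = acc.reverse ++ (cur.reverse ++ (sp c l).1) :: (sp c l).2 := by
  induction fuel generalizing l cur acc with
  | zero => omega
  | succ n ih =>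
    cases l with
    | nil => rw [PySem.Chars.splitOn.go.eq_def]; simp [sp]
    | cons ch rest =>
      rw [PySem.Chars.splitOn.go.eq_def]
      simp only []
      by_cases hc : ch = c
      · subst hc
        rw [if_pos (by simp [List.isPrefixOf])]
        rw [ih _ _ _ (by simpa using Nat.lt_of_succ_lt_succ h)]
        simp [sp]
      · rw [if_neg (by simp [List.isPrefixOf]; exact fun e => hc e.symm)]
        rw [ih _ _ _ (by simpa using Nat.lt_of_succ_lt_succ h)]
        simp [sp, hc]

theorem splitOn_eq (c : Char) (l : List Char) :
    PySem.Chars.splitOn l [c] = (sp c l).1 :: (sp c l).2 := by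
  rw [PySem.Chars.splitOn, go_eq c _ l [] [] (by omega)]; simp

theorem sp_no_sep (c : Char) (l : List Char) (h : c ∉ l) : sp c l = (l, []) := by
  induction l with
  | nil => rfl
  | cons h t ih => simp at h; simp [sp, Ne.symm h.1, ih h.2]

theorem sp_snd_nil (c : Char) (l : List Char) (h : (sp c l).2 = []) : (sp c l).1 = l := by
  induction l with
  | nil => rfl
  | cons ch t ih =>
    by_cases hc : ch = c
    · simp [sp, hc] at h
    · simp [sp, hc] at h ⊢; exact ih h

theorem digit_no_colon (l : List Char) (h : PySem.Chars.strIsdigit l = true) : ':' ∉ l := by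
  simp [PySem.Chars.strIsdigit, List.all_eq_true] at h
  intro hm
  have := h.2 _ hm
  simp [PySem.Chars.isdigit] at this

theorem main_eq (value : String) : parse_duration_to_ms value = parse_duration_to_ms_alt value := by
  obtain ⟨cs, hcs⟩ : ∃ cs, PySem.Str.strip value = String.ofList cs := ⟨_, rfl⟩
  unfold parse_duration_to_ms parse_duration_to_ms_alt pySplit
  rw [hcs]
  simp only [PySem.Str.strIsdigit, String.toList_ofList]
  have hsep : (":" : String).toList = [':'] := by decide
  rw [hsep, splitOn_eq]
  obtain ⟨p, ps, hsp⟩ : ∃ p ps, sp ':' cs = (p, ps) := ⟨_, _, rfl⟩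
  rw [hsp]
  by_cases hnil : cs = []
  · subst hnil
    simp [sp] at hsp
    simp [← hsp.1, PySem.Chars.strIsdigit]
  · rw [if_neg (by simpa using hnil)]
    by_cases hdig : PySem.Chars.strIsdigit cs = true
    · rw [if_pos hdig]
      have hthis := sp_no_sep ':' cs (digit_no_colon cs hdig)
      rw [hsp] at hthis
      injection hthis with hp hps
      subst hp
      subst hps
      simp [hdig, PySem.List.pyGetD_zero_cons]
    · rw [if_neg hdig]
      by_cases hall : ((p :: ps).map String.ofList).all PySem.Str.strIsdigit = true
      · have hps1 : ps ≠ [] := by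
          intro h
          subst h
          have h1 := sp_snd_nil ':' cs (by rw [hsp])
          rw [hsp] at h1
          simp at h1
          subst h1
          simp [PySem.Str.strIsdigit] at hall
          exact hdig hall
        match ps with
        | [] => exact absurd rfl hps1
        | [b] =>
          simp [PySem.List.pyGetD, PySem.List.pyGet?, PySem.List.pyIdx?]
        | [b, c3] =>
          simp only [List.map_cons, List.map_nil, List.all_cons, List.all_nil,
            Bool.and_true, Bool.and_eq_true, PySem.Str.strIsdigit, String.toList_ofList] at hall
          simp [hall.1, hall.2.1, hall.2.2, PySem.List.pyGetD, PySem.List.pyGet?, PySem.List.pyIdx?]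
          ring
        | b :: c3 :: d :: rest =>
          simp
      · rw [Bool.not_eq_true] at hall
        have h' : PySem.Chars.strIsdigit p = false ∨ ∃ x ∈ ps, PySem.Chars.strIsdigit x = false := by
          have himp : PySem.Chars.strIsdigit p = true → ∃ x ∈ ps, PySem.Chars.strIsdigit x = false := by
            simpa using hall
          by_cases hp : PySem.Chars.strIsdigit p = true
          · exact Or.inr (himp hp)
          · exact Or.inl (by simpa using hp)
        simp [h']

-- ===== VERDICT (by name: the statement is the Claim_ definition above) =====
theorem parse_duration_to_ms_spec : Claim_equal_parse_duration_to_ms := by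
  intro value _
  unfold Spec_parse_duration_to_ms
  exact main_eq value
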